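-- pv_equiv track=rewrite | github.com/Peoplecreai/charthop-webhook | app/clients/charthop.py | _normalize_import_rows
-- ===== SOURCE A (Python) =====
-- from collections import OrderedDict
-- from typing import Any, Dict, Iterable, Iterator, List, Optional
--
-- def _normalize_import_rows(rows: Iterable[Dict[str, object]]) -> tuple[List[OrderedDict[str, str]], List[str]]:
--     normalized: List[OrderedDict[str, str]] = []
--     fieldnames: List[str] = []
--     seen_fields: set[str] = set()
--     for row in rows:
--         if not row:
--             continue
--         ordered: OrderedDict[str, str] = OrderedDict()
--         for key, value in row.items():
--             if key is None:
--                 continue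
--             key_str = str(key).strip()
--             if not key_str:
--                 continue
--             if key_str not in seen_fields:
--                 fieldnames.append(key_str)
--                 seen_fields.add(key_str)
--             if isinstance(value, str):
--                 ordered[key_str] = value.strip()
--             elif value is None:
--                 ordered[key_str] = ""
--             else:
--                 ordered[key_str] = str(value)
--         if ordered:
--             normalized.append(ordered)
--     return normalized, fieldnames
-- ===== SOURCE B (Python) =====
-- from collections import OrderedDict
-- from typing import Dict, Iterable, List
--
--
-- def _normalize_import_rows(rows: Iterable[Dict[str, object]]) -> tuple[List[OrderedDict[str, str]], List[str]]:
--     # Pass 1: normalize each row; keep only rows that end up non-empty.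
--     normalized: List[OrderedDict[str, str]] = []
--     for row in rows:
--         clean: OrderedDict[str, str] = OrderedDict()
--         for key, value in (row or {}).items():
--             if key is None:
--                 continue
--             k = str(key).strip()
--             if not k:
--                 continue
--             clean[k] = value.strip() if isinstance(value, str) else ("" if value is None else str(value))
--         if clean:
--             normalized.append(clean)
--     # Pass 2: fieldnames = first-appearance-ordered unique keys of the kept rows.
--     fieldnames: List[str] = []
--     seen: set[str] = set()
--     for clean in normalized:
--         for k in clean:
--             if k not in seen:
--                 seen.add(k)
--                 fieldnames.append(k)
--     return normalized, fieldnames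
-- ===== Notes on version B (the rewrite author's own statement) =====
-- stated objective: simpler
-- what changed: Replaces A's single interleaved loop (which threads normalization, the fieldname list and the seen-set together) by two independent passes: one that only normalizes rows, then one that collects first-appearance unique fieldnames from the kept rows' keys.
import Mathlib
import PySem

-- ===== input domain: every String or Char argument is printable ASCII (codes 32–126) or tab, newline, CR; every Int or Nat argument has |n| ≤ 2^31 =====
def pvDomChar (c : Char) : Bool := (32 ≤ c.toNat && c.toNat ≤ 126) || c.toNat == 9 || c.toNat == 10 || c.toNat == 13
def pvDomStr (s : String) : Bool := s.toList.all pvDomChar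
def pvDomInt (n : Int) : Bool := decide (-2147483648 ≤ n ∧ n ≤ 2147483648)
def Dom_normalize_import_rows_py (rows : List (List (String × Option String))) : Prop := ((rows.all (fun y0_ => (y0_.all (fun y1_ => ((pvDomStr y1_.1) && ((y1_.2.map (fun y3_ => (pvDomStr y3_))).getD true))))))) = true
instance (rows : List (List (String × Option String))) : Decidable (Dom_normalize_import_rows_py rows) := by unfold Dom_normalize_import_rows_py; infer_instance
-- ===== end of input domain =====

-- B replaces A's single interleaved loop by two independent passes (normalize rows, then
-- collect first-appearance unique fieldnames from the kept rows); same results, no speed claim.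

-- ===== PORT A =====
-- Literal port of A's one interleaved loop; the per-row loop body and the per-cell loop body
-- are the named helpers below.  (Lean keys are String, so A's `if key is None: continue`
-- branch is unrepresentable; the value's `else str(value)` branch is unreachable for
-- Option String values.)

-- body of A's `for key, value in row.items()` loop: state = (ordered, fieldnames, seen_fields)
def pvAInner (st : PySem.Dict String String × List String × PySem.Set String)
    (kv : String × Option String) :
    PySem.Dict String String × List String × PySem.Set String :=
  let ks := PySem.Str.strip kv.1
  if ks = "" then st
  else
    let st1 := if PySem.Set.contains st.2.2 ks then st
               else (st.1, st.2.1 ++ [ks], PySem.Set.add st.2.2 ks)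
    (st1.1.insert ks (match kv.2 with | some s => PySem.Str.strip s | none => ""), st1.2)

-- body of A's `for row in rows` loop: state = (normalized, fieldnames, seen_fields)
def pvAStep (acc : List (List (String × String)) × List String × PySem.Set String)
    (row : List (String × Option String)) :
    List (List (String × String)) × List String × PySem.Set String :=
  if row = [] then acc
  else
    let inner := row.foldl pvAInner (PySem.Dict.empty, acc.2.1, acc.2.2)
    if inner.1.items = [] then (acc.1, inner.2)
    else (acc.1 ++ [inner.1.items], inner.2)

def normalize_import_rows_py (rows : List (List (String × Option String))) : (List (List (String × String))) × List String :=
  let st := rows.foldl pvAStep ([], [], PySem.Set.empty)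
  (st.1, st.2.1)

-- ===== PORT B =====
-- body of B's inner normalization loop (pass 1)
def pvBInner (d : PySem.Dict String String) (kv : String × Option String) :
    PySem.Dict String String :=
  let k := PySem.Str.strip kv.1
  if k = "" then d
  else d.insert k (match kv.2 with | some s => PySem.Str.strip s | none => "")

-- body of B's `for row in rows` loop (pass 1)
def pvBStep1 (acc : List (List (String × String))) (row : List (String × Option String)) :
    List (List (String × String)) :=
  let clean := row.foldl pvBInner PySem.Dict.empty
  if clean.items = [] then acc else acc ++ [clean.items]

-- body of B's `if k not in seen` dedup (pass 2): state = (fieldnames, seen)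
def pvBSeen (p : List String × PySem.Set String) (kv : String × String) :
    List String × PySem.Set String :=
  if PySem.Set.contains p.2 kv.1 then p
  else (p.1 ++ [kv.1], PySem.Set.add p.2 kv.1)

def normalize_import_rows_py_alt (rows : List (List (String × Option String))) : (List (List (String × String))) × List String :=
  let normalized := rows.foldl pvBStep1 []
  let fs := normalized.foldl (fun p r => r.foldl pvBSeen p) ([], PySem.Set.empty)
  (normalized, fs.1)

-- ===== PRECONDITION & SPEC =====
def Spec_normalize_import_rows_py (rows : List (List (String × Option String))) (out : (List (List (String × String))) × List String) : Prop := out = normalize_import_rows_py_alt rows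
instance (rows : List (List (String × Option String))) (out : (List (List (String × String))) × List String) : Decidable (Spec_normalize_import_rows_py rows out) := by unfold Spec_normalize_import_rows_py; infer_instance

-- ===== CLAIM (what is proved, stated in full; the proofs are below) =====
def Claim_equal_normalize_import_rows_py : Prop := ∀ (rows : List (List (String × Option String))), Dom_normalize_import_rows_py rows → Spec_normalize_import_rows_py rows (normalize_import_rows_py rows)

-- ===== LEMMAS AND PROOFS =====

-- the seen-set dedup fold, over a plain list of keys
def pvDedup (F : List String) (ks : List String) : List String :=
  ks.foldl (fun F k => if PySem.Set.contains F k then F else F ++ [k]) F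

-- the per-cell value normalization
def pvVal (v : Option String) : String := match v with | some s => PySem.Str.strip s | none => ""

-- the (possibly duplicated) normalized non-blank keys of a row, in order
def pvKeys (row : List (String × Option String)) : List String :=
  (row.filter (fun kv => PySem.Str.strip kv.1 != "")).map (fun kv => PySem.Str.strip kv.1)

def pvPairs (row : List (String × Option String)) : List (String × String) :=
  (row.filter (fun kv => PySem.Str.strip kv.1 != "")).map (fun kv => (PySem.Str.strip kv.1, pvVal kv.2))

-- B's inner dict fold, from an arbitrary start dict
def pvCleanFrom (d : PySem.Dict String String) (row : List (String × Option String)) : PySem.Dict String String :=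
  row.foldl pvBInner d

def pvClean (row : List (String × Option String)) : PySem.Dict String String :=
  pvCleanFrom PySem.Dict.empty row

-- B's pass-1 result
def pvP : List (List (String × Option String)) → List (List (String × String))
  | [] => []
  | r :: rs => if (pvClean r).items = [] then pvP rs else (pvClean r).items :: pvP rs

-- B's pass-2 result, from an arbitrary start
def pvFns (F : List String) (P : List (List (String × String))) : List String :=
  P.foldl (fun F r => pvDedup F (r.map Prod.fst)) F

theorem pvDedup_nil (F : List String) : pvDedup F [] = F := rfl

theorem pvDedup_cons (F : List String) (k : String) (ks : List String) :
    pvDedup F (k :: ks) = pvDedup (if PySem.Set.contains F k then F else F ++ [k]) ks := rfl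

theorem pvDedup_append (F : List String) (a b : List String) :
    pvDedup F (a ++ b) = pvDedup (pvDedup F a) b := by
  simp [pvDedup, List.foldl_append]

theorem mem_pvDedup_left (ks : List String) (F : List String) (x : String) (h : x ∈ F) :
    x ∈ pvDedup F ks := by
  induction ks generalizing F with
  | nil => exact h
  | cons k ks ih =>
      rw [pvDedup_cons]
      split
      · exact ih F h
      · exact ih _ (List.mem_append_left _ h)

theorem mem_pvDedup_right (ks : List String) (F : List String) (x : String) (h : x ∈ ks) :
    x ∈ pvDedup F ks := by
  induction ks generalizing F with
  | nil => cases h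
  | cons k ks ih =>
      rw [pvDedup_cons]
      rcases List.mem_cons.mp h with rfl | hx
      · split
        · rename_i hc
          exact mem_pvDedup_left ks F x (by simpa using hc)
        · exact mem_pvDedup_left ks _ x (List.mem_append_right _ (by simp))
      · exact ih _ hx

-- deduplicating a key list is the same as deduplicating its set of first occurrences
theorem pvDedup_ofList (ks : List String) (F : List String) :
    pvDedup F (PySem.Set.ofList ks) = pvDedup F ks := by
  induction ks using List.reverseRecOn with
  | nil => rfl
  | append_singleton ks k ih =>
      rw [PySem.Set.ofList_append_singleton, pvDedup_append F ks [k]]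
      by_cases hk : k ∈ PySem.Set.ofList ks
      · have hks : k ∈ ks := by simpa [PySem.Set.mem_ofList] using hk
        rw [PySem.Set.add_of_mem hk, ih]
        have hmem : k ∈ pvDedup F ks := mem_pvDedup_right ks F k hks
        rw [pvDedup_cons, if_pos ((PySem.Set.contains_iff _ _).mpr hmem), pvDedup_nil]
      · rw [PySem.Set.add_of_not_mem hk, pvDedup_append F (PySem.Set.ofList ks) [k], ih]

-- the seen-set of A's fold stays equal (as a list) to the fieldnames list; both collapse to pvDedup
theorem pvPairFold (ks : List String) (F : List String) :
    ks.foldl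
      (fun (p : List String × PySem.Set String) k =>
        if PySem.Set.contains p.2 k then p
        else (p.1 ++ [k], PySem.Set.add p.2 k)) (F, F)
      = (pvDedup F ks, pvDedup F ks) := by
  induction ks generalizing F with
  | nil => rfl
  | cons k ks ih =>
      rw [List.foldl_cons, pvDedup_cons]
      by_cases hc : k ∈ F
      · rw [if_pos ((PySem.Set.contains_iff _ _).mpr hc), if_pos ((PySem.Set.contains_iff _ _).mpr hc)]
        exact ih F
      · have hb : ¬ PySem.Set.contains F k = true := fun h => hc ((PySem.Set.contains_iff F k).mp h)
        rw [if_neg hb, if_neg hb, PySem.Set.add_of_not_mem hc]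
        exact ih (F ++ [k])

-- splitting A's interleaved inner fold into its dict and fieldname components
theorem pvInnerA_split (row : List (String × Option String))
    (d : PySem.Dict String String) (F : List String) :
    row.foldl pvAInner (d, F, F)
      = (pvCleanFrom d row, pvDedup F (pvKeys row), pvDedup F (pvKeys row)) := by
  induction row generalizing d F with
  | nil => rfl
  | cons kv row ih =>
      by_cases hk : PySem.Str.strip kv.1 = ""
      · simpa [pvAInner, pvCleanFrom, pvBInner, pvKeys, hk] using ih d F
      · by_cases hc : PySem.Str.strip kv.1 ∈ F
        · simpa [pvAInner, pvCleanFrom, pvBInner, pvKeys, pvVal, pvDedup_cons, hk, hc] using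
            ih (d.insert (PySem.Str.strip kv.1) (pvVal kv.2)) F
        · simpa [pvAInner, pvCleanFrom, pvBInner, pvKeys, pvVal, pvDedup_cons, hk, hc,
              PySem.Set.add_of_not_mem hc] using
            ih (d.insert (PySem.Str.strip kv.1) (pvVal kv.2)) (F ++ [PySem.Str.strip kv.1])

theorem pvCleanFrom_eq (row : List (String × Option String)) (d : PySem.Dict String String) :
    pvCleanFrom d row = (pvPairs row).foldl (fun d kv => d.insert kv.1 kv.2) d := by
  induction row generalizing d with
  | nil => rfl
  | cons kv row ih =>
      by_cases hk : PySem.Str.strip kv.1 = ""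
      · simpa [pvCleanFrom, pvBInner, pvPairs, hk] using ih d
      · simpa [pvCleanFrom, pvBInner, pvPairs, pvVal, hk] using
          ih (d.insert (PySem.Str.strip kv.1) (pvVal kv.2))

theorem pvClean_keys (row : List (String × Option String)) :
    (pvClean row).items.map Prod.fst = PySem.Set.ofList (pvKeys row) := by
  have hkeys : (pvClean row).keys
      = PySem.Set.update (PySem.Dict.empty : PySem.Dict String String).keys ((pvPairs row).map Prod.fst) := by
    rw [pvClean, pvCleanFrom_eq]
    exact PySem.Dict.keys_foldl_insert_key (l := pvPairs row) (key := Prod.fst)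
      (f := fun _ kv => kv.2) (d := (PySem.Dict.empty : PySem.Dict String String))
  have hmapfst : (pvPairs row).map Prod.fst = pvKeys row := by
    simp [pvPairs, pvKeys]
  simpa [PySem.Dict.keys, hmapfst, PySem.Dict.keys_empty, PySem.Set.update_nil_left] using hkeys

theorem pvFns_nil (F : List String) : pvFns F [] = F := rfl

theorem pvFns_cons (F : List String) (r : List (String × String)) (P : List (List (String × String))) :
    pvFns F (r :: P) = pvFns (pvDedup F (r.map Prod.fst)) P := rfl

-- B's pass 1 from an arbitrary accumulator
theorem pvB_pass1 (rows : List (List (String × Option String))) (acc : List (List (String × String))) :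
    rows.foldl pvBStep1 acc = acc ++ pvP rows := by
  induction rows generalizing acc with
  | nil => simp [pvP]
  | cons r rs ih =>
      rw [List.foldl_cons]
      have hstep : pvBStep1 acc r
          = if (pvClean r).items = [] then acc else acc ++ [(pvClean r).items] := rfl
      rw [hstep]
      by_cases h : (pvClean r).items = []
      · rw [if_pos h, ih acc]
        simp [pvP, h]
      · rw [if_neg h, ih (acc ++ [(pvClean r).items])]
        simp [pvP, h]

-- B's pass 2 collapses to pvFns
theorem pvB_pass2 (P : List (List (String × String))) (F : List String) :
    P.foldl (fun p r => r.foldl pvBSeen p) (F, F) = (pvFns F P, pvFns F P) := by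
  induction P generalizing F with
  | nil => rfl
  | cons r P ih =>
      have hrow : r.foldl pvBSeen (F, F)
          = (pvDedup F (r.map Prod.fst), pvDedup F (r.map Prod.fst)) := by
        have : r.foldl pvBSeen (F, F)
            = (r.map Prod.fst).foldl
                (fun (p : List String × PySem.Set String) k =>
                  if PySem.Set.contains p.2 k then p
                  else (p.1 ++ [k], PySem.Set.add p.2 k)) (F, F) := by
          rw [List.foldl_map]
          rfl
        rw [this]
        exact pvPairFold (r.map Prod.fst) F
      rw [List.foldl_cons, hrow, pvFns_cons]
      exact ih _

-- A's per-row step, from a state whose fieldname list and seen set agree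
theorem pvAStep_ne (N : List (List (String × String))) (F : List String)
    (r : List (String × Option String)) (hr : r ≠ []) :
    pvAStep (N, F, F) r
      = (if (pvClean r).items = [] then N else N ++ [(pvClean r).items],
         pvDedup F (pvKeys r), pvDedup F (pvKeys r)) := by
  unfold pvAStep
  rw [if_neg hr]
  show (let inner := r.foldl pvAInner (PySem.Dict.empty, F, (F : PySem.Set String))
        if inner.1.items = [] then (N, inner.2) else (N ++ [inner.1.items], inner.2)) = _
  simp only [pvInnerA_split r PySem.Dict.empty F]
  by_cases h : (pvClean r).items = []
  · rw [pvClean] at h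
    simp [h, pvClean]
  · rw [pvClean] at h
    simp [h, pvClean]

-- the main invariant: A's interleaved fold equals B's two passes, from any state (N, F, F)
theorem pvMain (rows : List (List (String × Option String)))
    (N : List (List (String × String))) (F : List String) :
    rows.foldl pvAStep (N, F, F)
      = (N ++ pvP rows, pvFns F (pvP rows), pvFns F (pvP rows)) := by
  induction rows generalizing N F with
  | nil => simp [pvP, pvFns_nil]
  | cons r rs ih =>
      rw [List.foldl_cons]
      by_cases hr : r = []
      · subst hr
        exact ih N F
      · rw [pvAStep_ne N F r hr]
        by_cases h : (pvClean r).items = []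
        · have hofl : PySem.Set.ofList (pvKeys r) = [] := by
            have := pvClean_keys r
            rw [h] at this
            simpa using this.symm
          have hded : pvDedup F (pvKeys r) = F := by
            rw [← pvDedup_ofList, hofl, pvDedup_nil]
          rw [if_pos h, hded, ih N F]
          simp [pvP, h]
        · have hded : pvDedup F ((pvClean r).items.map Prod.fst) = pvDedup F (pvKeys r) := by
            rw [pvClean_keys, pvDedup_ofList]
          rw [if_neg h, ih (N ++ [(pvClean r).items]) (pvDedup F (pvKeys r))]
          have hP : pvP (r :: rs) = (pvClean r).items :: pvP rs := by
            simp [pvP, h]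
          rw [hP, pvFns_cons, hded]
          simp

-- ===== VERDICT (by name: the statement is the Claim_ definition above) =====
theorem normalize_import_rows_py_spec : Claim_equal_normalize_import_rows_py := by
  intro rows _
  unfold Spec_normalize_import_rows_py normalize_import_rows_py normalize_import_rows_py_alt
  rw [show (PySem.Set.empty : PySem.Set String) = ([] : List String) from rfl,
    pvMain rows [] [], pvB_pass1 rows []]
  simp only [List.nil_append]
  rw [pvB_pass2 (pvP rows) []]
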